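-- pv_equiv track=rewrite | github.com/Victor-Estrada-git/api_autech | regex_logic.py | _has_outer_parens
-- ===== SOURCE A (Python) =====
-- def _has_outer_parens(s: str) -> bool:
--     """True if *s* is wrapped by matching outer parentheses."""
--     if not (s.startswith('(') and s.endswith(')')):
--         return False
--     depth = 0
--     for i, c in enumerate(s):
--         if c == '(':
--             depth += 1
--         elif c == ')':
--             depth -= 1
--         if depth == 0:
--             return i == len(s) - 1
--     return False
-- ===== SOURCE B (Python) =====
-- def _has_outer_parens(s: str) -> bool:
--     """True if *s* is wrapped by matching outer parentheses."""
--     partner = {}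
--     stack = []
--     for i, c in enumerate(s):
--         if c == '(':
--             stack.append(i)
--         elif c == ')' and stack:
--             partner[stack.pop()] = i
--     return partner.get(0) == len(s) - 1
-- ===== Notes on version B (the rewrite author's own statement) =====
-- stated objective: alternative
-- what changed: Replaces A's guarded single-counter depth scan (startswith/endswith check plus a running depth with early return at the first zero) by the classic stack-based bracket matcher: push indices of '(' on a stack, pop on ')' recording each matched pair in a dict, then answer with one lookup — the partner of index 0 must be the last index (no startswith/endswith guard at all).
import Mathlib
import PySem

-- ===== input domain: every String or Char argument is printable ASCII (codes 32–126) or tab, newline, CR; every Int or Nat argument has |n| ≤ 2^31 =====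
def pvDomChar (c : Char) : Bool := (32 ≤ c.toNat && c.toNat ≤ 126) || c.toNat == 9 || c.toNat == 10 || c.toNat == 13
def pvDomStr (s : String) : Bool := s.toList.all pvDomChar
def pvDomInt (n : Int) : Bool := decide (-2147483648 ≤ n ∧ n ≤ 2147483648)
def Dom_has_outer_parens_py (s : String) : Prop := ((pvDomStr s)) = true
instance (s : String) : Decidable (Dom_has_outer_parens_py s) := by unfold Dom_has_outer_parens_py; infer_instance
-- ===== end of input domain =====

-- B drops A's guard-plus-depth-counter scan entirely: it runs the classic stack-based bracket
-- matcher (push indices of opening parens, pop on closing ones, record each matched pair in a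
-- dict) and answers with one lookup — the partner of index 0 must be the last index (no speed claim).

-- ===== PORT A =====
-- A's for-loop over enumerate(s): depth update, then early return (i == len(s)-1) at first zero depth.
def pvALoop (depth : Int) (i : Int) (n : Int) (cs : List Char) : Bool :=
  match cs with
  | [] => false
  | c :: rest =>
    let depth' := if c = '(' then depth + 1 else if c = ')' then depth - 1 else depth
    if depth' = 0 then i == n - 1
    else pvALoop depth' (i + 1) n rest

def has_outer_parens_py (s : String) : Bool :=
  if !(PySem.Str.startswith s "(" && PySem.Str.endswith s ")") then false
  else pvALoop 0 0 (s.toList.length : Int) s.toList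

-- ===== PORT B =====
-- Source B's loop: push index on '(', on ')' with nonempty stack pop and record partner[popped] = i.
def pvBLoop (partner : PySem.Dict Int Int) (stack : List Int) (i : Int) (cs : List Char) :
    PySem.Dict Int Int :=
  match cs with
  | [] => partner
  | c :: rest =>
    if c = '(' then pvBLoop partner (stack ++ [i]) (i + 1) rest
    else if c = ')' then
      match PySem.List.pop? stack with   -- stack.pop(); none exactly when the stack is empty
      | some (x, st') => pvBLoop (partner.insert x i) st' (i + 1) rest
      | none => pvBLoop partner stack (i + 1) rest
    else pvBLoop partner stack (i + 1) rest

def has_outer_parens_py_alt (s : String) : Bool :=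
  let partner := pvBLoop PySem.Dict.empty [] 0 s.toList
  match partner.get? 0 with               -- partner.get(0) == len(s) - 1 (None == int is False)
  | some j => j == (s.toList.length : Int) - 1
  | none => false

-- ===== PRECONDITION & SPEC =====
def Spec_has_outer_parens_py (s : String) (out : Bool) : Prop := out = has_outer_parens_py_alt s
instance (s : String) (out : Bool) : Decidable (Spec_has_outer_parens_py s out) := by unfold Spec_has_outer_parens_py; infer_instance

-- ===== CLAIM (what is proved, stated in full; the proofs are below) =====
def Claim_equal_has_outer_parens_py : Prop := ∀ (s : String), Dom_has_outer_parens_py s → Spec_has_outer_parens_py s (has_outer_parens_py s)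

-- ===== LEMMAS AND PROOFS =====

-- Once key 0 can no longer be pushed (all stack entries and all future indices are nonzero),
-- B's loop never touches the dict at key 0.
theorem pvB_get0_const : ∀ (cs : List Char) (partner : PySem.Dict Int Int) (stack : List Int)
    (i : Int), (∀ x ∈ stack, x ≠ 0) → 0 < i →
    (pvBLoop partner stack i cs).get? 0 = partner.get? 0 := by
  intro cs
  induction cs with
  | nil => intro partner stack i _ _; simp [pvBLoop]
  | cons c rest ih =>
    intro partner stack i hst hi
    simp only [pvBLoop]
    by_cases h1 : c = '('
    · rw [if_pos h1]
      refine (ih _ _ _ ?_ (by omega)).trans rfl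
      intro x hx
      rcases List.mem_append.mp hx with h | h
      · exact hst x h
      · simp at h; omega
    · rw [if_neg h1]
      by_cases h2 : c = ')'
      · rw [if_pos h2]
        rcases stack.eq_nil_or_concat with rfl | ⟨st', x, rfl⟩
        · simp only [PySem.List.pop?]
          exact ih _ _ _ hst (by omega)
        · simp only [List.concat_eq_append] at hst ⊢
          rw [PySem.List.pop?_last]
          have hx0 : x ≠ 0 := hst x (by simp)
          refine (ih _ _ _ (fun y hy => hst y (List.mem_append_left _ hy)) (by omega)).trans ?_
          exact PySem.Dict.get?_insert_of_ne _ _ (fun h => hx0 h.symm)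
      · rw [if_neg h2]
        exact ih _ _ _ hst (by omega)

-- B's loop run with index 0 at the bottom of the stack, read off at key 0, computes exactly
-- A's remaining depth scan (stack height = depth; 0 is popped at the first return to depth 0).
theorem pvL : ∀ (cs : List Char) (st : List Int) (partner : PySem.Dict Int Int) (i n : Int),
    0 < i → (∀ x ∈ st, x ≠ 0) → partner.get? 0 = none → n = i + cs.length →
    (match (pvBLoop partner (0 :: st) i cs).get? 0 with
     | some j => j == n - 1
     | none => false)
    = pvALoop ((st.length : Int) + 1) i n cs := by
  intro cs
  induction cs with
  | nil =>
    intro st partner i n _ _ h0 _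
    simp [pvBLoop, pvALoop, h0]
  | cons c rest ih =>
    intro st partner i n hi hst h0 hn
    simp only [pvBLoop, pvALoop]
    by_cases h1 : c = '('
    · rw [if_pos h1, if_pos h1]
      have hne : ¬ ((st.length : Int) + 1 + 1 = 0) := by omega
      rw [if_neg hne]
      have hcons : (0 :: st) ++ [i] = 0 :: (st ++ [i]) := by simp
      rw [hcons]
      have := ih (st ++ [i]) partner (i + 1) n (by omega)
        (by intro x hx
            rcases List.mem_append.mp hx with h | h
            · exact hst x h
            · simp at h; omega)
        h0 (by simp at hn ⊢; omega)
      rw [this]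
      congr 1
      push_cast [List.length_append, List.length_singleton]
      ring
    · rw [if_neg h1, if_neg h1]
      by_cases h2 : c = ')'
      · rw [if_pos h2, if_pos h2]
        rcases st.eq_nil_or_concat with rfl | ⟨st', x, rfl⟩
        · -- stack is [0]: 0 is popped here, partner[0] = i, and the dict entry survives
          have hpop : PySem.List.pop? ([0] : List Int) = some (0, []) :=
            PySem.List.pop?_last [] 0
          rw [hpop]
          have hget : (pvBLoop (partner.insert 0 i) [] (i + 1) rest).get? 0 = some i := by
            rw [pvB_get0_const rest _ [] (i + 1) (by simp) (by omega)]
            exact PySem.Dict.get?_insert_self _ _ _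
          rw [hget]
          simp
        · -- stack is 0 :: st' ++ [x]: a nonzero index x is popped, depth stays positive
          simp only [List.concat_eq_append] at hst ⊢
          have hcons : (0 : Int) :: (st' ++ [x]) = (0 :: st') ++ [x] := by simp
          rw [hcons, PySem.List.pop?_last]
          have hx0 : x ≠ 0 := hst x (by simp)
          have hlen : ((st' ++ [x]).length : Int) + 1 - 1 = (st'.length : Int) + 1 := by
            push_cast [List.length_append, List.length_singleton]
            ring
          have hne : ¬ (((st' ++ [x]).length : Int) + 1 - 1 = 0) := by
            push_cast [List.length_append, List.length_singleton]
            omega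
          rw [if_neg hne, hlen]
          exact ih st' (partner.insert x i) (i + 1) n (by omega)
            (fun y hy => hst y (List.mem_append_left _ hy))
            ((PySem.Dict.get?_insert_of_ne _ _ (fun h => hx0 h.symm)).trans h0)
            (by simp at hn ⊢; omega)
      · rw [if_neg h2, if_neg h2]
        have hne : ¬ ((st.length : Int) + 1 = 0) := by omega
        rw [if_neg hne]
        exact ih st partner (i + 1) n (by omega) hst h0 (by simp at hn ⊢; omega)

-- A's scan started at positive depth returns false when the string does not end in ')'
-- (the first return to depth 0 happens at a ')', so it cannot be the last position).
theorem pvALoop_false_of_last_ne : ∀ (cs : List Char) (d i n : Int), 0 < d →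
    n = i + cs.length → cs.getLast? ≠ some ')' → pvALoop d i n cs = false := by
  intro cs
  induction cs with
  | nil => intro d i n _ _ _; simp [pvALoop]
  | cons c rest ih =>
    intro d i n hd hn hlast
    simp only [pvALoop]
    by_cases h0 : (if c = '(' then d + 1 else if c = ')' then d - 1 else d) = 0
    · rw [if_pos h0]
      have hc : c = ')' := by
        by_contra hc
        by_cases h1 : c = '(' <;> simp [h1, hc] at h0 <;> omega
      cases rest with
      | nil => simp [hc] at hlast
      | cons c' r' =>
        have : ¬ (i = n - 1) := by
          simp at hn; omega
        simp [this]
    · rw [if_neg h0]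
      have hd' : 0 < (if c = '(' then d + 1 else if c = ')' then d - 1 else d) := by
        split_ifs at h0 ⊢ <;> omega
      cases rest with
      | nil => simp [pvALoop]
      | cons c' r' =>
        exact ih _ _ _ hd' (by simp at hn ⊢; omega)
          (by rwa [List.getLast?_cons_cons] at hlast)

-- the list-level statement: A's guarded depth scan = B's stack matcher + final lookup
theorem pv_main : ∀ (l : List Char),
    (if !(PySem.Chars.startswith l ['('] && PySem.Chars.endswith l [')']) then false
     else pvALoop 0 0 (l.length : Int) l)
    = (match (pvBLoop PySem.Dict.empty [] 0 l).get? 0 with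
       | some j => j == (l.length : Int) - 1
       | none => false) := by
  intro l
  cases l with
  | nil => decide
  | cons c rest =>
    by_cases hc : c = '('
    · subst hc
      have hsw : PySem.Chars.startswith ('(' :: rest) ['('] = true :=
        (PySem.Chars.startswith_iff _ _).mpr ⟨rest, rfl⟩
      have hB : (match (pvBLoop PySem.Dict.empty [] 0 ('(' :: rest)).get? 0 with
                 | some j => j == ((('(' :: rest).length : Nat) : Int) - 1
                 | none => false)
          = pvALoop 1 1 ((('(' :: rest).length : Nat) : Int) rest := by
        simp only [pvBLoop, List.nil_append, zero_add]
        have := pvL rest [] PySem.Dict.empty 1 ((('(' :: rest).length : Nat) : Int) one_pos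
          (by simp) (PySem.Dict.get?_empty 0) (by simp; omega)
        simpa using this
      rw [hsw, hB]
      by_cases hew : PySem.Chars.endswith ('(' :: rest) [')'] = true
      · rw [hew]
        simp only [Bool.and_self, Bool.not_true, Bool.false_eq_true, if_false]
        simp [pvALoop]
      · rw [Bool.not_eq_true] at hew
        rw [hew]
        simp only [Bool.and_false, Bool.not_false, if_true]
        cases rest with
        | nil => simp [pvALoop]
        | cons c' r' =>
          refine (pvALoop_false_of_last_ne (c' :: r') 1 1 _ one_pos (by simp; omega) ?_).symm
          intro h
          obtain ⟨l', hl'⟩ := List.getLast?_eq_some_iff.mp h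
          have : PySem.Chars.endswith ('(' :: c' :: r') [')'] = true :=
            (PySem.Chars.endswith_iff _ _).mpr ⟨'(' :: l', by rw [hl']; simp⟩
          simp [this] at hew
    · have hsw : PySem.Chars.startswith (c :: rest) ['('] = false := by
        rw [Bool.eq_false_iff]
        intro h
        obtain ⟨t, ht⟩ := (PySem.Chars.startswith_iff _ _).mp h
        simp only [List.cons_append, List.nil_append] at ht
        exact hc (List.cons.inj ht).1.symm
      rw [hsw]
      simp only [Bool.false_and, Bool.not_false, if_true]
      have hB : (pvBLoop PySem.Dict.empty [] 0 (c :: rest)).get? 0 = none := by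
        simp only [pvBLoop, if_neg hc, zero_add]
        by_cases h2 : c = ')'
        · rw [if_pos h2]
          have hpop : PySem.List.pop? ([] : List Int) = none := rfl
          rw [hpop]
          rw [pvB_get0_const rest _ [] 1 (by simp) one_pos]
          exact PySem.Dict.get?_empty 0
        · rw [if_neg h2]
          rw [pvB_get0_const rest _ [] 1 (by simp) one_pos]
          exact PySem.Dict.get?_empty 0
      rw [hB]

-- ===== VERDICT (by name: the statement is the Claim_ definition above) =====
theorem has_outer_parens_py_spec : Claim_equal_has_outer_parens_py := by
  intro s _
  unfold Spec_has_outer_parens_py has_outer_parens_py has_outer_parens_py_alt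
  rw [PySem.Str.startswith_eq, PySem.Str.endswith_eq]
  have h1 : "(".toList = ['('] := rfl
  have h2 : ")".toList = [')'] := rfl
  rw [h1, h2]
  exact pv_main s.toList
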